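-- pv_equiv track=rewrite | github.com/glbala87/telomerediff | src/teloscan/engine.py | iter_kmer_runs_fuzzy
-- ===== SOURCE A (Python) =====
-- from typing import Dict, Iterable, Iterator, List, Optional, Tuple
--
-- def hamming(a: str, b: str) -> int:
--     return sum(x != y for x, y in zip(a, b))
--
-- def iter_kmer_runs_fuzzy(seq: str, k: int, seed: str, max_mismatch: int, min_run_bp: int) -> Iterator[Tuple[int, int, int]]:
--     """
--     Find in-frame runs matching a seed motif allowing up to max_mismatch per k-mer copy.
--     Returns tuples: (start, end, copies)
--     """
--     seq = seq.upper()
--     seed = seed.upper()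
--     n = len(seq)
--     if n < 2 * k:
--         return
--
--     i = 0
--     while i + k <= n:
--         chunk = seq[i:i + k]
--         if "N" in chunk:
--             i += 1
--             continue
--
--         if hamming(chunk, seed) <= max_mismatch:
--             j = i + k
--             copies = 1
--             while j + k <= n:
--                 nxt = seq[j:j + k]
--                 if "N" in nxt:
--                     break
--                 if hamming(nxt, seed) <= max_mismatch:
--                     copies += 1
--                     j += k
--                 else:
--                     break
--
--             run_bp = copies * k
--             if copies >= 2 and run_bp >= min_run_bp:
--                 yield i, j, copies
--
--             i = j
--         else:
--             i += 1
-- ===== SOURCE B (Python) =====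
-- def iter_kmer_runs_fuzzy(seq, k, seed, max_mismatch, min_run_bp):
--     seq = seq.upper()
--     seed = seed.upper()
--     n = len(seq)
--     if k < 1 or n < 2 * k:
--         return
--     m = n - k + 1
--     # prefix counts of 'N' make the N-in-window check O(1)
--     ncnt = [0]
--     for ch in seq:
--         ncnt.append(ncnt[-1] + (1 if ch == 'N' else 0))
--     idxs = [i for i in range(m) if ncnt[i + k] == ncnt[i]]
--     # per-window mismatch counts against the seed, built column by column,
--     # only for windows free of 'N'
--     mis = [(i, 0) for i in idxs]
--     for d in range(min(k, len(seed))):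
--         c = seed[d]
--         mis = [(i, v + (1 if seq[i + d] != c else 0)) for (i, v) in mis]
--     good = {i for (i, v) in mis if v <= max_mismatch}
--     i = 0
--     while i <= n - k:
--         if i in good:
--             j = i + k
--             copies = 1
--             while j <= n - k and j in good:
--                 copies += 1
--                 j += k
--             if copies >= 2 and copies * k >= min_run_bp:
--                 yield i, j, copies
--             i = j
--         else:
--             i += 1
-- ===== Notes on version B (the rewrite author's own statement) =====
-- stated objective: alternative
-- what changed: A rescans every k-mer window with a fresh slice, an 'N' substring search and a hamming zip; B precomputes 'N' prefix sums to list the N-free windows, builds their mismatch counts column by column against the seed, and runs the same greedy scan against the resulting set of good windows.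
-- outside the precondition, e.g. on iter_kmer_runs_fuzzy('ACGT', 0, 'AC', -1, 1): A returns [], B returns []
import Mathlib
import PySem

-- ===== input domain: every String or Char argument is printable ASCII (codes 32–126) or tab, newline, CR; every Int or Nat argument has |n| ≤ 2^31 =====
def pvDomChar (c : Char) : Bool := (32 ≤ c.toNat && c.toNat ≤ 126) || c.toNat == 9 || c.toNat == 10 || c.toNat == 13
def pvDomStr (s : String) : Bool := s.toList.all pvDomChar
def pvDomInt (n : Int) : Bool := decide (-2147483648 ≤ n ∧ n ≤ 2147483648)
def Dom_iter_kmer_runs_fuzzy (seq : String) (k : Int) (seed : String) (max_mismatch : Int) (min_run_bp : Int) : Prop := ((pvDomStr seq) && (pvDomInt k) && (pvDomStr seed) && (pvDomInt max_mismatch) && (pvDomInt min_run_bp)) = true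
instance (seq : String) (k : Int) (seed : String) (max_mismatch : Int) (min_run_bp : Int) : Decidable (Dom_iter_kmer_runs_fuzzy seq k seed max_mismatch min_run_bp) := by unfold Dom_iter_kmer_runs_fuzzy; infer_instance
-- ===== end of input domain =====

-- B replaces A's per-window slicing, 'N' substring rescans and hamming zips by 'N' prefix
-- counts, a column-wise mismatch table over the N-free windows and a set of good windows
-- consumed by the same greedy scan (objective: alternative; not claimed faster).

-- ===== PORT A =====
-- hamming(a, b) = sum(x != y for x, y in zip(a, b))
def pvHamming (a b : List Char) : Int :=
  ((a.zip b).map (fun p => if p.1 ≠ p.2 then (1 : Int) else 0)).sum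

-- inner while loop of A: extends a run k by k; returns (j, copies)
def pvAInner (s : List Char) (n k : Int) (sd : List Char) (mm : Int) :
    Nat → Int → Int → Int × Int
  | 0, j, copies => (j, copies)           -- fuel exhausted (never happens for k ≥ 1)
  | fuel + 1, j, copies =>
    if j + k ≤ n then
      let nxt := PySem.List.slice s (some j) (some (j + k))
      if PySem.Chars.isIn ['N'] nxt then (j, copies)
      else if pvHamming nxt sd ≤ mm then pvAInner s n k sd mm fuel (j + k) (copies + 1)
      else (j, copies)
    else (j, copies)

-- outer while loop of A
def pvAOuter (s : List Char) (n k : Int) (sd : List Char) (mm mr : Int) :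
    Nat → Int → List (Int × Int × Int) → List (Int × Int × Int)
  | 0, _, acc => acc                      -- fuel exhausted (never happens for k ≥ 1)
  | fuel + 1, i, acc =>
    if i + k ≤ n then
      let chunk := PySem.List.slice s (some i) (some (i + k))
      if PySem.Chars.isIn ['N'] chunk then pvAOuter s n k sd mm mr fuel (i + 1) acc
      else if pvHamming chunk sd ≤ mm then
        let r := pvAInner s n k sd mm (s.length + 1) (i + k) 1
        let acc' := if 2 ≤ r.2 ∧ mr ≤ r.2 * k then acc ++ [(i, r.1, r.2)] else acc
        pvAOuter s n k sd mm mr fuel r.1 acc'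
      else pvAOuter s n k sd mm mr fuel (i + 1) acc
    else acc

def iter_kmer_runs_fuzzy (seq : String) (k : Int) (seed : String) (max_mismatch : Int) (min_run_bp : Int) : List (Int × Int × Int) :=
  let s := PySem.Chars.upper seq.toList
  let sd := PySem.Chars.upper seed.toList
  let n : Int := s.length
  if n < 2 * k then []
  else pvAOuter s n k sd max_mismatch min_run_bp (s.length + 1) 0 []

-- ===== PORT B =====
-- prefix counts of 'N' (ncnt[-1] is getLast!, exact: the list is never empty)
def pvBNcnt (s : List Char) : List Int :=
  s.foldl (fun nc ch => nc ++ [nc.getLast! + (if ch = 'N' then 1 else 0)]) [(0 : Int)]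

-- windows free of 'N' (comprehension over range(m); ncnt indices are in range, getD exact)
def pvBIdxs (ncnt : List Int) (kt m : Nat) : List Nat :=
  (List.range m).filter (fun i => ncnt.getD (i + kt) 0 == ncnt.getD i 0)

-- mismatch table for the N-free windows, built column by column
-- (sd.getD d / s.getD (p.1 + d) are exact: indices in range)
def pvBMis (s sd : List Char) (kt : Nat) (idxs : List Nat) : List (Nat × Int) :=
  (List.range (min kt sd.length)).foldl
    (fun mis d =>
      let c := sd.getD d ' '
      mis.map (fun p => (p.1, p.2 + (if s.getD (p.1 + d) ' ' ≠ c then 1 else 0))))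
    (idxs.map (fun i => (i, 0)))

def pvBGood (mis : List (Nat × Int)) (mm : Int) : PySem.Set Nat :=
  PySem.Set.ofList ((mis.filter (fun p => decide (p.2 ≤ mm))).map (fun p => p.1))

def pvBInner (good : PySem.Set Nat) (n k : Int) : Nat → Int → Int → Int × Int
  | 0, j, copies => (j, copies)
  | fuel + 1, j, copies =>
    if j ≤ n - k then
      if PySem.Set.contains good j.toNat then pvBInner good n k fuel (j + k) (copies + 1)
      else (j, copies)
    else (j, copies)

def pvBScan (good : PySem.Set Nat) (n k mr : Int) :
    Nat → Int → List (Int × Int × Int) → List (Int × Int × Int)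
  | 0, _, acc => acc
  | fuel + 1, i, acc =>
    if i ≤ n - k then
      if PySem.Set.contains good i.toNat then
        let r := pvBInner good n k (n + 1).toNat (i + k) 1
        let acc' := if 2 ≤ r.2 ∧ mr ≤ r.2 * k then acc ++ [(i, r.1, r.2)] else acc
        pvBScan good n k mr fuel r.1 acc'
      else pvBScan good n k mr fuel (i + 1) acc
    else acc

def iter_kmer_runs_fuzzy_alt (seq : String) (k : Int) (seed : String) (max_mismatch : Int) (min_run_bp : Int) : List (Int × Int × Int) :=
  let s := PySem.Chars.upper seq.toList
  let sd := PySem.Chars.upper seed.toList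
  let n : Int := s.length
  if k < 1 ∨ n < 2 * k then []
  else
    let kt := k.toNat
    let m := s.length + 1 - kt
    let good := pvBGood (pvBMis s sd kt (pvBIdxs (pvBNcnt s) kt m)) max_mismatch
    pvBScan good n k min_run_bp (s.length + 1) 0 []

-- ===== PRECONDITION & SPEC =====
-- Pre_ excludes k ≤ 0, where A's while-loops run on empty slices: for max_mismatch ≥ 0
-- A loops forever, and otherwise its empty return is an accident of slice semantics.
def Pre_iter_kmer_runs_fuzzy (seq : String) (k : Int) (seed : String) (max_mismatch : Int) (min_run_bp : Int) : Prop := 1 ≤ k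
instance (seq : String) (k : Int) (seed : String) (max_mismatch : Int) (min_run_bp : Int) : Decidable (Pre_iter_kmer_runs_fuzzy seq k seed max_mismatch min_run_bp) := by unfold Pre_iter_kmer_runs_fuzzy; infer_instance

def pvWitness_iter_kmer_runs_fuzzy : String × Int × String × Int × Int := ("ACGTACGTAA", 4, "ACGT", 1, 8)

def Spec_iter_kmer_runs_fuzzy (seq : String) (k : Int) (seed : String) (max_mismatch : Int) (min_run_bp : Int) (out : List (Int × Int × Int)) : Prop := out = iter_kmer_runs_fuzzy_alt seq k seed max_mismatch min_run_bp
instance (seq : String) (k : Int) (seed : String) (max_mismatch : Int) (min_run_bp : Int) (out : List (Int × Int × Int)) : Decidable (Spec_iter_kmer_runs_fuzzy seq k seed max_mismatch min_run_bp out) := by unfold Spec_iter_kmer_runs_fuzzy; infer_instance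

-- ===== CLAIM (what is proved, stated in full; the proofs are below) =====
def Claim_equal_iter_kmer_runs_fuzzy : Prop := ∀ (seq : String) (k : Int) (seed : String) (max_mismatch : Int) (min_run_bp : Int), Dom_iter_kmer_runs_fuzzy seq k seed max_mismatch min_run_bp → Pre_iter_kmer_runs_fuzzy seq k seed max_mismatch min_run_bp → Spec_iter_kmer_runs_fuzzy seq k seed max_mismatch min_run_bp (iter_kmer_runs_fuzzy seq k seed max_mismatch min_run_bp)

-- ===== LEMMAS AND PROOFS =====

-- hamming as a sum over positions
theorem pvHamming_eq_range (a b : List Char) :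
    pvHamming a b =
      ((List.range (min a.length b.length)).map
        (fun d => if a.getD d ' ' ≠ b.getD d ' ' then (1 : Int) else 0)).sum := by
  induction a generalizing b with
  | nil => simp [pvHamming]
  | cons x xs ih =>
    cases b with
    | nil => simp [pvHamming]
    | cons y ys =>
      simp only [pvHamming, List.zip_cons_cons, List.map_cons, List.sum_cons, List.length_cons,
        Nat.add_min_add_right, List.range_succ_eq_map, List.map_map, List.getD_cons_zero]
      have hx := ih ys
      simp only [pvHamming] at hx
      rw [hx]
      congr 1

-- the mismatch table holds the column sums
theorem pvBMis_eq (s sd : List Char) (kt : Nat) (idxs : List Nat) :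
    pvBMis s sd kt idxs =
      idxs.map (fun i => (i,
        ((List.range (min kt sd.length)).map
          (fun d => if s.getD (i + d) ' ' ≠ sd.getD d ' ' then (1 : Int) else 0)).sum)) := by
  have key : ∀ (ds : List Nat) (g : Nat → Int),
      ds.foldl (fun mis d =>
          mis.map (fun p => (p.1, p.2 + (if s.getD (p.1 + d) ' ' ≠ sd.getD d ' ' then 1 else 0))))
        (idxs.map (fun i => (i, g i))) =
      idxs.map (fun i => (i, g i +
        (ds.map (fun d => if s.getD (i + d) ' ' ≠ sd.getD d ' ' then (1 : Int) else 0)).sum)) := by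
    intro ds
    induction ds with
    | nil => intro g; simp
    | cons d ds ihd =>
      intro g
      rw [List.foldl_cons]
      have hstep : (idxs.map (fun i => (i, g i))).map
          (fun p => (p.1, p.2 + (if s.getD (p.1 + d) ' ' ≠ sd.getD d ' ' then 1 else 0))) =
          idxs.map (fun i => (i, g i + (if s.getD (i + d) ' ' ≠ sd.getD d ' ' then 1 else 0))) := by
        rw [List.map_map]
        rfl
      rw [hstep, ihd]
      apply List.map_congr_left
      intro i _
      simp [add_assoc]
  have h0 := key (List.range (min kt sd.length)) (fun _ => 0)
  simpa [pvBMis] using h0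

theorem pvGetLast!_concat (l : List Int) (x : Int) : (l ++ [x]).getLast! = x := by
  cases l with
  | nil => rfl
  | cons a as =>
    rw [show ((a :: as) ++ [x]) = a :: (as ++ [x]) from rfl]
    simp [List.getLast!]

theorem pvBNcnt_spec (s : List Char) :
    (pvBNcnt s).length = s.length + 1 ∧
      (pvBNcnt s).getLast! = (s.countP (· == 'N') : Int) ∧
      ∀ i ≤ s.length, (pvBNcnt s).getD i 0 = ((s.take i).countP (· == 'N') : Int) := by
  induction s using List.reverseRecOn with
  | nil =>
    refine ⟨rfl, rfl, ?_⟩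
    intro i hi
    have : i = 0 := by simpa using hi
    subst this
    rfl
  | append_singleton s c ih =>
    obtain ⟨hlen, hlast, hent⟩ := ih
    have hstep : pvBNcnt (s ++ [c]) =
        pvBNcnt s ++ [(pvBNcnt s).getLast! + (if c = 'N' then 1 else 0)] := by
      simp [pvBNcnt, List.foldl_append]
    refine ⟨?_, ?_, ?_⟩
    · rw [hstep]; simp [hlen]
    · rw [hstep, pvGetLast!_concat, hlast]
      simp only [List.countP_append, List.countP_singleton]
      push_cast
      by_cases hc : c = 'N' <;> simp [hc]
    · intro i hi
      rw [hstep]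
      rcases Nat.lt_or_ge i (s.length + 1) with hlt | hge
      · rw [List.getD_append _ _ 0 i (by omega), hent i (by omega),
          List.take_append_of_le_length (by omega)]
      · have hieq : i = s.length + 1 := by simp at hi; omega
        subst hieq
        have hR : (s ++ [c]).take (s.length + 1) = s ++ [c] := List.take_of_length_le (by simp)
        have hL : ((pvBNcnt s) ++ [(pvBNcnt s).getLast! + (if c = 'N' then 1 else 0)]).getD (s.length + 1) 0 = (pvBNcnt s).getLast! + (if c = 'N' then 1 else 0) := by
          rw [show s.length + 1 = (pvBNcnt s).length from hlen.symm]
          simp [List.getD_eq_getElem?_getD]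
        rw [hR, hL, hlast]
        simp only [List.countP_append, List.countP_singleton]
        push_cast
        by_cases hc : c = 'N' <;> simp [hc]

-- the good set agrees with A's per-window tests
theorem pvGood_eq (s sd : List Char) (k mm : Int) (hk : 1 ≤ k) :
    ∀ j : Int, 0 ≤ j → j + k ≤ (s.length : Int) →
      PySem.Set.contains
          (pvBGood (pvBMis s sd k.toNat (pvBIdxs (pvBNcnt s) k.toNat (s.length + 1 - k.toNat))) mm)
          j.toNat =
        (!(PySem.Chars.isIn ['N'] (PySem.List.slice s (some j) (some (j + k)))) &&
          decide (pvHamming (PySem.List.slice s (some j) (some (j + k))) sd ≤ mm)) := by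
  intro j hj hjk
  have hik : j.toNat + k.toNat ≤ s.length := by omega
  have him : j.toNat < s.length + 1 - k.toNat := by omega
  have hslice : PySem.List.slice s (some j) (some (j + k)) = (s.drop j.toNat).take k.toNat := by
    rw [PySem.List.slice_toNat s hj (by omega)]
    rw [show (j + k).toNat - j.toNat = k.toNat by omega]
  have hwlen : ((s.drop j.toNat).take k.toNat).length = k.toNat := by
    simp only [List.length_take, List.length_drop]
    omega
  have hwget : ∀ d < k.toNat, ((s.drop j.toNat).take k.toNat).getD d ' ' = s.getD (j.toNat + d) ' ' := by
    intro d hd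
    rw [List.getD_eq_getElem?_getD, List.getD_eq_getElem?_getD,
      List.getElem?_take_of_lt hd, List.getElem?_drop]
  have hham : pvHamming ((s.drop j.toNat).take k.toNat) sd =
      ((List.range (min k.toNat sd.length)).map
        (fun d => if s.getD (j.toNat + d) ' ' ≠ sd.getD d ' ' then (1 : Int) else 0)).sum := by
    rw [pvHamming_eq_range, hwlen]
    congr 1
    apply List.map_congr_left
    intro d hd
    rw [hwget d (by simp only [List.mem_range] at hd; omega)]
  obtain ⟨-, -, hnent⟩ := pvBNcnt_spec s
  have hc1 := hnent (j.toNat + k.toNat) (by omega)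
  have hc0 := hnent j.toNat (by omega)
  have htake : s.take (j.toNat + k.toNat) = s.take j.toNat ++ (s.drop j.toNat).take k.toNat :=
    List.take_add
  have hNbeq : (((pvBNcnt s).getD (j.toNat + k.toNat) 0 == (pvBNcnt s).getD j.toNat 0)) = true ↔
      ¬ 'N' ∈ (s.drop j.toNat).take k.toNat := by
    rw [hc1, hc0, htake, List.countP_append, beq_iff_eq]
    constructor
    · intro heq hmem
      have hw : 0 < ((s.drop j.toNat).take k.toNat).countP (· == 'N') := by
        rw [List.countP_pos_iff]
        exact ⟨'N', hmem, by simp⟩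
      omega
    · intro hmem
      have hw0 : ((s.drop j.toNat).take k.toNat).countP (· == 'N') = 0 := by
        rw [List.countP_eq_zero]
        intro a ha hbe
        exact hmem (by simpa using (beq_iff_eq.mp hbe) ▸ ha)
      rw [hw0]
      push_cast
      ring
  have hIdxs : j.toNat ∈ pvBIdxs (pvBNcnt s) k.toNat (s.length + 1 - k.toNat) ↔
      ¬ 'N' ∈ (s.drop j.toNat).take k.toNat := by
    rw [pvBIdxs, List.mem_filter, List.mem_range]
    constructor
    · intro ⟨_, hb⟩; exact hNbeq.mp hb
    · intro hm; exact ⟨him, hNbeq.mpr hm⟩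
  have hNmem : ('N' ∈ (s.drop j.toNat).take k.toNat) ↔
      PySem.Chars.isIn ['N'] ((s.drop j.toNat).take k.toNat) = true := by
    rw [PySem.Chars.isIn_iff_infix, List.singleton_infix_iff]
  rw [hslice]
  apply Bool.coe_iff_coe.mp
  rw [PySem.Set.contains_iff, pvBGood, PySem.Set.mem_ofList, pvBMis_eq]
  constructor
  · intro hmem
    simp only [List.mem_map, List.mem_filter] at hmem
    obtain ⟨p, ⟨⟨i', hi', hpi⟩, hple⟩, hpi1⟩ := hmem
    subst hpi
    simp only at hpi1
    subst hpi1
    simp only [decide_eq_true_eq] at hple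
    have hNfree := hIdxs.mp hi'
    simp only [Bool.and_eq_true, Bool.not_eq_true', decide_eq_true_eq]
    refine ⟨?_, by rw [hham]; exact hple⟩
    cases hbe : PySem.Chars.isIn ['N'] ((s.drop j.toNat).take k.toNat)
    · rfl
    · exact absurd (hNmem.mpr hbe) hNfree
  · intro hrhs
    simp only [Bool.and_eq_true, Bool.not_eq_true', decide_eq_true_eq] at hrhs
    obtain ⟨hNf, hle⟩ := hrhs
    have hNfree : ¬ 'N' ∈ (s.drop j.toNat).take k.toNat := by
      intro hm
      rw [hNmem.mp hm] at hNf
      exact absurd hNf (by decide)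
    simp only [List.mem_map, List.mem_filter]
    refine ⟨(j.toNat, pvHamming ((s.drop j.toNat).take k.toNat) sd), ⟨?_, by simpa using hle⟩, rfl⟩
    exact ⟨j.toNat, hIdxs.mpr hNfree, by rw [hham]⟩

theorem pvAInner_fst_nonneg (s : List Char) (n k : Int) (sd : List Char) (mm : Int)
    (hk : 0 ≤ k) : ∀ (fuel : Nat) (j c : Int), 0 ≤ j →
    0 ≤ (pvAInner s n k sd mm fuel j c).1 := by
  intro fuel
  induction fuel with
  | zero => intro j c hj; exact hj
  | succ f ih =>
    intro j c hj
    simp only [pvAInner]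
    split_ifs with h1 h2 h3
    · exact hj
    · exact ih (j + k) (c + 1) (by omega)
    · exact hj
    · exact hj

theorem pvInner_congr (s : List Char) (k : Int) (sd : List Char) (mm : Int) (good : PySem.Set Nat)
    (hk : 1 ≤ k)
    (H : ∀ j : Int, 0 ≤ j → j + k ≤ (s.length : Int) →
      PySem.Set.contains good j.toNat =
        (!(PySem.Chars.isIn ['N'] (PySem.List.slice s (some j) (some (j + k)))) &&
          decide (pvHamming (PySem.List.slice s (some j) (some (j + k))) sd ≤ mm))) :
    ∀ (fuel : Nat) (j c : Int), 0 ≤ j →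
      pvAInner s (s.length : Int) k sd mm fuel j c = pvBInner good (s.length : Int) k fuel j c := by
  intro fuel
  induction fuel with
  | zero => intro j c _; rfl
  | succ f ih =>
    intro j c hj
    simp only [pvAInner, pvBInner]
    by_cases hjk : j + k ≤ (s.length : Int)
    · have hb : j ≤ (s.length : Int) - k := by omega
      rw [if_pos hjk, if_pos hb, H j hj hjk]
      by_cases hN : PySem.Chars.isIn ['N'] (PySem.List.slice s (some j) (some (j + k))) = true
      · simp [hN]
      · simp only [Bool.not_eq_true] at hN
        simp only [hN, Bool.not_false, Bool.true_and, Bool.false_eq_true, if_false]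
        by_cases hH : pvHamming (PySem.List.slice s (some j) (some (j + k))) sd ≤ mm
        · simp only [hH, decide_true, if_pos]
          exact ih (j + k) (c + 1) (by omega)
        · simp [hH]
    · have hb : ¬ (j ≤ (s.length : Int) - k) := by omega
      rw [if_neg hjk, if_neg hb]

theorem pvOuter_congr (s : List Char) (k : Int) (sd : List Char) (mm mr : Int) (good : PySem.Set Nat)
    (hk : 1 ≤ k)
    (H : ∀ j : Int, 0 ≤ j → j + k ≤ (s.length : Int) →
      PySem.Set.contains good j.toNat =
        (!(PySem.Chars.isIn ['N'] (PySem.List.slice s (some j) (some (j + k)))) &&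
          decide (pvHamming (PySem.List.slice s (some j) (some (j + k))) sd ≤ mm))) :
    ∀ (fuel : Nat) (i : Int) (acc : List (Int × Int × Int)), 0 ≤ i →
      pvAOuter s (s.length : Int) k sd mm mr fuel i acc = pvBScan good (s.length : Int) k mr fuel i acc := by
  intro fuel
  induction fuel with
  | zero => intro i acc _; rfl
  | succ f ih =>
    intro i acc hi
    simp only [pvAOuter, pvBScan]
    by_cases hik : i + k ≤ (s.length : Int)
    · have hb : i ≤ (s.length : Int) - k := by omega
      rw [if_pos hik, if_pos hb, H i hi hik]
      by_cases hN : PySem.Chars.isIn ['N'] (PySem.List.slice s (some i) (some (i + k))) = true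
      · simp only [hN, if_true, Bool.not_true, Bool.false_and, Bool.false_eq_true, if_false]
        exact ih (i + 1) acc (by omega)
      · simp only [Bool.not_eq_true] at hN
        simp only [hN, Bool.not_false, Bool.true_and, Bool.false_eq_true, if_false]
        by_cases hH : pvHamming (PySem.List.slice s (some i) (some (i + k))) sd ≤ mm
        · simp only [hH, decide_true, if_pos]
          have hfuel : s.length + 1 = (((s.length : Int)) + 1).toNat := by omega
          rw [pvInner_congr s k sd mm good hk H (s.length + 1) (i + k) 1 (by omega), hfuel]
          exact ih _ _ (by
            have := pvAInner_fst_nonneg s (s.length : Int) k sd mm (by omega) (s.length + 1) (i + k) 1 (by omega)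
            rw [pvInner_congr s k sd mm good hk H (s.length + 1) (i + k) 1 (by omega), hfuel] at this
            exact this)
        · simp only [hH, decide_false, Bool.false_eq_true, if_false]
          exact ih (i + 1) acc (by omega)
    · have hb : ¬ (i ≤ (s.length : Int) - k) := by omega
      rw [if_neg hik, if_neg hb]

-- ===== VERDICT (by name: the statement is the Claim_ definition above) =====
theorem iter_kmer_runs_fuzzy_spec : Claim_equal_iter_kmer_runs_fuzzy := by
  intro seq k seed mm mr _hdom hkpre
  have hk : 1 ≤ k := hkpre
  unfold Spec_iter_kmer_runs_fuzzy iter_kmer_runs_fuzzy iter_kmer_runs_fuzzy_alt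
  have hk' : ¬ (k < 1) := by omega
  by_cases hn : ((PySem.Chars.upper seq.toList).length : Int) < 2 * k
  · simp [hn, hk']
  · simp only [hn, hk', false_or, if_false]
    exact pvOuter_congr (PySem.Chars.upper seq.toList) k (PySem.Chars.upper seed.toList) mm mr _
      hk (pvGood_eq _ _ k mm hk) _ 0 [] le_rfl
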